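-- pv_equiv track=rewrite | github.com/pextacy/forecast-risk-dashboard | backend/app/services/groq_explainability.py | _generate_execution_steps
-- ===== SOURCE A (Python) =====
-- from typing import Dict, List, Optional, Any
--
-- def _generate_execution_steps(changes: Dict) -> List[str]:
--     """Generate practical execution steps."""
--     steps = ["Review current market conditions"]
--
--     # Sort by magnitude of change
--     sorted_changes = sorted(changes.items(), key=lambda x: abs(x[1]), reverse=True)
--
--     for asset, change in sorted_changes[:2]:
--         if change > 0:
--             steps.append(f"Gradually accumulate {asset}")
--         else:
--             steps.append(f"Reduce {asset} position over time")
--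
--     steps.append("Monitor portfolio impact after changes")
--     return steps
-- ===== SOURCE B (Python) =====
-- def _generate_execution_steps(changes):
--     """Generate practical execution steps."""
--     # Single pass: track the two items with largest |change|, first-seen wins ties
--     # (same tie-breaking as a stable descending sort).
--     best = None
--     second = None
--     for item in changes.items():
--         if best is None or abs(item[1]) > abs(best[1]):
--             second = best
--             best = item
--         elif second is None or abs(item[1]) > abs(second[1]):
--             second = item
--
--     steps = ["Review current market conditions"]
--     for picked in (best, second):
--         if picked is not None:
--             asset, change = picked
--             if change > 0:
--                 steps.append(f"Gradually accumulate {asset}")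
--             else:
--                 steps.append(f"Reduce {asset} position over time")
--     steps.append("Monitor portfolio impact after changes")
--     return steps
-- ===== Notes on version B (the rewrite author's own statement) =====
-- stated objective: alternative
-- what changed: Replaced the full sort of all changes plus [:2] slice by a single pass that maintains the two items with largest absolute change (stable ties), building the same steps from them.
import Mathlib
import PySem

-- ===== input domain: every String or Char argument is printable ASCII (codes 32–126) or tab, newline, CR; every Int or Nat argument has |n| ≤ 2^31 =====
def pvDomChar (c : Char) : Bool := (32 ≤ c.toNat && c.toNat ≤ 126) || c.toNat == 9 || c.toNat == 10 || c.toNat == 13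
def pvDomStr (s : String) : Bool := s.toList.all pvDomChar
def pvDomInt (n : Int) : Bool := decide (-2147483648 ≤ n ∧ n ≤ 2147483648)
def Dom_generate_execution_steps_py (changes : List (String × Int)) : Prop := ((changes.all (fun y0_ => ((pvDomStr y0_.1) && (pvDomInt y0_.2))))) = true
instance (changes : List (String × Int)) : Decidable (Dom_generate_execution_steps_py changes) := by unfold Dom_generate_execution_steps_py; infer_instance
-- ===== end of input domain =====

-- B replaces A's full sort + [:2] slice by a single-pass top-2 selection (alternative decomposition).


-- ===== PORT A =====
def generate_execution_steps_py (changes : List (String × Int)) : List String :=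
  let steps : List String := ["Review current market conditions"]
  let sorted_changes := PySem.List.sorted changes (fun x => |x.2|) true
  let steps := (PySem.List.slice sorted_changes none (some 2)).foldl
    (fun steps p =>
      if p.2 > 0 then steps ++ ["Gradually accumulate " ++ p.1]
      else steps ++ ["Reduce " ++ p.1 ++ " position over time"]) steps
  steps ++ ["Monitor portfolio impact after changes"]

-- ===== PORT B =====
-- Source B's loop state: the two items with largest |change| seen so far (best, second)
def pvTop2Step (st : Option (String × Int) × Option (String × Int)) (item : String × Int) :
    Option (String × Int) × Option (String × Int) :=
  if (match st.1 with | none => true | some b => |item.2| > |b.2|) then (some item, st.1)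
  else if (match st.2 with | none => true | some s => |item.2| > |s.2|) then (st.1, some item)
  else st

def pvDescribe (p : String × Int) : String :=
  if p.2 > 0 then "Gradually accumulate " ++ p.1
  else "Reduce " ++ p.1 ++ " position over time"

def generate_execution_steps_py_alt (changes : List (String × Int)) : List String :=
  let bs := changes.foldl pvTop2Step (none, none)
  ["Review current market conditions"]
    ++ ([bs.1, bs.2].filterMap id).map pvDescribe
    ++ ["Monitor portfolio impact after changes"]

-- ===== PRECONDITION & SPEC =====
def Spec_generate_execution_steps_py (changes : List (String × Int)) (out : List String) : Prop := out = generate_execution_steps_py_alt changes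
instance (changes : List (String × Int)) (out : List String) : Decidable (Spec_generate_execution_steps_py changes out) := by unfold Spec_generate_execution_steps_py; infer_instance

-- ===== CLAIM (what is proved, stated in full; the proofs are below) =====
def Claim_equal_generate_execution_steps_py : Prop := ∀ (changes : List (String × Int)), Dom_generate_execution_steps_py changes → Spec_generate_execution_steps_py changes (generate_execution_steps_py changes)

-- ===== LEMMAS AND PROOFS =====

-- first two elements of a list, as B's option pair
def pvTake2 (s : List (String × Int)) : Option (String × Int) × Option (String × Int) :=
  (s[0]?, s[1]?)

-- one insertion-sort step only moves the first two elements the way B's update does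
theorem pvTake2_insertBy (x : String × Int) (s : List (String × Int)) :
    pvTake2 (PySem.List.insertBy (fun a b => decide (|b.2| < |a.2|)) x s) = pvTop2Step (pvTake2 s) x := by
  rcases s with _ | ⟨a, _ | ⟨b, t⟩⟩ <;>
    simp only [PySem.List.insertBy, pvTake2, pvTop2Step] <;> split_ifs <;>
    simp_all <;> omega

-- invariant: B's fold state is the first two elements of A's (reverse) insertion sort
theorem pvTop2_inv (xs : List (String × Int)) (acc : List (String × Int)) :
    xs.foldl pvTop2Step (pvTake2 acc)
      = pvTake2 (xs.foldl (fun a x => PySem.List.insertBy (fun a b => decide (|b.2| < |a.2|)) x a) acc) := by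
  induction xs generalizing acc with
  | nil => rfl
  | cons x xs ih =>
    simp only [List.foldl_cons]
    rw [← pvTake2_insertBy x acc]
    exact ih _

-- ===== VERDICT (by name: the statement is the Claim_ definition above) =====
theorem generate_execution_steps_py_spec : Claim_equal_generate_execution_steps_py := by
  intro changes _
  unfold Spec_generate_execution_steps_py generate_execution_steps_py generate_execution_steps_py_alt
  have h := pvTop2_inv changes []
  rw [show (pvTake2 [] : Option (String × Int) × Option (String × Int)) = (none, none) from rfl] at h
  dsimp only
  rw [h, PySem.List.sorted_rev_eq_foldl_insertBy]
  generalize (changes.foldl (fun a x => PySem.List.insertBy (fun a b => decide (|b.2| < |a.2|)) x a) []) = s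
  rw [show PySem.List.slice s none (some 2) = s.take (2:Int).toNat from PySem.List.slice_to _ (by norm_num)]
  rcases s with _ | ⟨a, _ | ⟨b, t⟩⟩ <;>
    simp [pvTake2, pvDescribe] <;> split_ifs <;> simp
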